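-- pv_equiv track=rewrite | github.com/Sindhusharvs/repomain | month.py | coupon_frequency_cleaning
-- ===== SOURCE A (Python) =====
-- def coupon_frequency_cleaning(given_string):
--     coupon_frequency_sets = ({"jan", "jul"}, {"feb", "aug"}, {"mar", "sep"}, {"apr", "oct"}, {"may", "nov"}, {"jun", "dec"}, {"january", "july"}, {"february", "august"}, {"march", "september"}, {"april", "october"}, {"may", "november"}, {
--                              "june", "december"}, {"january", "april", "july", "october"}, {"jan", "apr", "jul", "oct"}, {"february", "may", "august", "november"}, {"feb", "may", "aug", "nov"}, {"march", "june", "september", "december"}, {"mar", "jun", "sep", "dec"})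
--
--     month_keyword_sets = {"january": {"january", "jan"}, "february": {"february", "feb"}, "march": {"march", "mar"}, "april": {"april", "apr"}, "may": {"may"}, "june": {"june", "jun"}, "july": {"july", "jul"},
--                           "august": {"august", "aug"}, "september": {"september", "sep", "sept"}, "october": {"october", "oct"}, "november": {"november", "nov"}, "december": {"december", "dec"}}
--     lower_string = given_string.lower()
--     input_str_list = lower_string.split()
--     buffer_set = set()
--     for each_string in input_str_list:
--         match_set = {month_key for month_key, month_keyword_set in month_keyword_sets.items()
--         for month_keyword in month_keyword_set if month_keyword == each_string}
--         if match_set: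
--             buffer_set.add(list(match_set)[0])
--     match_coupon_frequency_set = [
--         coupon_frequency_set for coupon_frequency_set in coupon_frequency_sets if buffer_set == coupon_frequency_set]
--     if match_coupon_frequency_set:
--         if len(match_coupon_frequency_set[0]) == 4:
--             return ("Quarterly", True)
--         elif len(match_coupon_frequency_set[0]) == 2:
--             return ("Semi Annually", True)
--     else:
--         return (None, False)
-- ===== SOURCE B (Python) =====
-- def coupon_frequency_cleaning(given_string):
--     names = ["january", "february", "march", "april", "may", "june",
--              "july", "august", "september", "october", "november", "december"]
--     keyword_to_month = {}
--     for i, name in enumerate(names, 1):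
--         keyword_to_month[name] = i
--         keyword_to_month[name[:3]] = i
--     keyword_to_month["sept"] = 9
--     months = {keyword_to_month[w] for w in given_string.lower().split() if w in keyword_to_month}
--     ms = sorted(months)
--     if len(ms) == 2 and ms[1] - ms[0] == 6:
--         return ("Semi Annually", True)
--     if len(ms) == 4 and ms[0] <= 3 and all(ms[j + 1] - ms[j] == 3 for j in range(3)):
--         return ("Quarterly", True)
--     return (None, False)
-- ===== Notes on version B (the rewrite author's own statement) =====
-- stated objective: simpler
-- what changed: B maps month keywords to month numbers and classifies arithmetically (two months 6 apart = Semi Annually, four months spaced 3 starting at <= 3 = Quarterly) instead of comparing the collected set against A's table of 18 literal frozenset patterns.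
import Mathlib
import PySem

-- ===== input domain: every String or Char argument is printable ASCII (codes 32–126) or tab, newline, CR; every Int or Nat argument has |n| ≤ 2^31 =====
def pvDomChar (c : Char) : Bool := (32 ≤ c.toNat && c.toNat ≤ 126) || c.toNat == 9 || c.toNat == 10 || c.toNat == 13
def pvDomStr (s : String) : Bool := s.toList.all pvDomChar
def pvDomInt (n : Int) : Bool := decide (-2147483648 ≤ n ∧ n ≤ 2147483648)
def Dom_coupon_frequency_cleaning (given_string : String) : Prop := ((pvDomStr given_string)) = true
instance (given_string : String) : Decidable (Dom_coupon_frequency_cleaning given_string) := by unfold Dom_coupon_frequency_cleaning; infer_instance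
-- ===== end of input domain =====

-- B classifies by month-number arithmetic (difference 6 / spacing 3) instead of A's table of 18 literal sets: a different decomposition of the same classification.

-- ===== PORT A =====
-- month_keyword_sets.items(), in dict insertion order; the inner Python set literals are written as lists
-- (a word matches at most one keyword, so their iteration order cannot affect the result)
def pvItemsA : List (String × List String) :=
  [("january", ["january", "jan"]), ("february", ["february", "feb"]), ("march", ["march", "mar"]),
   ("april", ["april", "apr"]), ("may", ["may"]), ("june", ["june", "jun"]), ("july", ["july", "jul"]),
   ("august", ["august", "aug"]), ("september", ["september", "sep", "sept"]), ("october", ["october", "oct"]),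
   ("november", ["november", "nov"]), ("december", ["december", "dec"])]

-- the set comprehension {month_key for month_key, month_keyword_set in items for month_keyword in set if month_keyword == each_string}
def pvMatchSet (w : String) : PySem.Set String :=
  PySem.Set.ofList (pvItemsA.flatMap (fun kv => kv.2.filterMap (fun kw => if kw == w then some kv.1 else none)))

-- coupon_frequency_sets, each Python set literal as the list of its (distinct) elements
def pvCouponSets : List (PySem.Set String) :=
  [["jan", "jul"], ["feb", "aug"], ["mar", "sep"], ["apr", "oct"], ["may", "nov"], ["jun", "dec"],
   ["january", "july"], ["february", "august"], ["march", "september"], ["april", "october"],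
   ["may", "november"], ["june", "december"],
   ["january", "april", "july", "october"], ["jan", "apr", "jul", "oct"],
   ["february", "may", "august", "november"], ["feb", "may", "aug", "nov"],
   ["march", "june", "september", "december"], ["mar", "jun", "sep", "dec"]]

-- 'if match_set: buffer_set.add(list(match_set)[0])' — match_set has at most one element, so [0] is its head
def pvBufferStep (bs : PySem.Set String) (w : String) : PySem.Set String :=
  match pvMatchSet w with
  | [] => bs
  | x :: _ => PySem.Set.add bs x

def pvClassifyA (buffer : PySem.Set String) : Option String × Bool :=
  match pvCouponSets.filter (fun c => PySem.Set.equal buffer c) with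
  | [] => (none, false)
  | m :: _ =>
    if PySem.Set.len m == 4 then (some "Quarterly", true)
    else if PySem.Set.len m == 2 then (some "Semi Annually", true)
    else (none, false)  -- unreachable: every coupon set has 2 or 4 elements (Python would fall through)

def coupon_frequency_cleaning (given_string : String) : Option String × Bool :=
  pvClassifyA ((PySem.Str.split₀ (PySem.Str.lower given_string)).foldl pvBufferStep PySem.Set.empty)

-- ===== PORT B =====
def pvNames : List String :=
  ["january", "february", "march", "april", "may", "june",
   "july", "august", "september", "october", "november", "december"]

-- keyword_to_month: name -> i and name[:3] -> i for i = 1..12, plus "sept" -> 9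
def pvKw : PySem.Dict String Int :=
  PySem.Dict.insert
    ((PySem.List.enumerate pvNames 1).foldl
      (fun d p => PySem.Dict.insert (PySem.Dict.insert d p.2 p.1) (PySem.Str.slice p.2 none (some 3)) p.1)
      PySem.Dict.empty)
    "sept" 9

-- {keyword_to_month[w] for w in words if w in keyword_to_month}
def pvMonthsStep (ms : PySem.Set Int) (w : String) : PySem.Set Int :=
  match PySem.Dict.get? pvKw w with
  | some m => PySem.Set.add ms m
  | none => ms

def pvClassifyB (months : PySem.Set Int) : Option String × Bool :=
  match PySem.List.sorted months (fun x => x) false with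
  | [a, b] => if b - a == 6 then (some "Semi Annually", true) else (none, false)
  | [a, b, c, d] =>
    if a ≤ 3 && b - a == 3 && c - b == 3 && d - c == 3 then (some "Quarterly", true) else (none, false)
  | _ => (none, false)

def coupon_frequency_cleaning_alt (given_string : String) : Option String × Bool :=
  pvClassifyB ((PySem.Str.split₀ (PySem.Str.lower given_string)).foldl pvMonthsStep PySem.Set.empty)

-- ===== PRECONDITION & SPEC =====
def Spec_coupon_frequency_cleaning (given_string : String) (out : Option String × Bool) : Prop := out = coupon_frequency_cleaning_alt given_string
instance (given_string : String) (out : Option String × Bool) : Decidable (Spec_coupon_frequency_cleaning given_string out) := by unfold Spec_coupon_frequency_cleaning; infer_instance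

-- ===== CLAIM (what is proved, stated in full; the proofs are below) =====
def Claim_equal_coupon_frequency_cleaning : Prop := ∀ (given_string : String), Dom_coupon_frequency_cleaning given_string → Spec_coupon_frequency_cleaning given_string (coupon_frequency_cleaning given_string)

-- ===== LEMMAS AND PROOFS =====
def pvNumOf (x : String) : Int := (pvNames.idxOf x : Int) + 1
set_option maxHeartbeats 8000000 in
set_option maxRecDepth 10000 in
lemma pvTable : ∀ a ∈ (["january","february","march"] : List String).sublists,
    ∀ b ∈ (["april","may","june"] : List String).sublists,
    ∀ c ∈ (["july","august","september"] : List String).sublists,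
    ∀ d ∈ (["october","november","december"] : List String).sublists,
    pvClassifyA (a ++ (b ++ (c ++ d))) = pvClassifyB ((a ++ (b ++ (c ++ d))).map pvNumOf) := by decide
def pvNameOf (m : Int) : String := pvNames.getD (m - 1).toNat ""
def pvAllKws : List String :=
  ["january","jan","february","feb","march","mar","april","apr","may","june","jun","july","jul",
   "august","aug","september","sep","sept","october","oct","november","nov","december","dec"]

lemma pvKw_keys : pvKw.keys = ["january","jan","february","feb","march","mar","april","apr","may",
  "june","jun","july","jul","august","aug","september","sep","october","oct","november","nov",
  "december","dec","sept"] := by decide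

set_option maxHeartbeats 1000000 in
lemma pvWord (w : String) :
    pvMatchSet w = ((pvKw.get? w).map pvNameOf).toList ∧
    1 ≤ ((pvKw.get? w).getD 1) ∧ ((pvKw.get? w).getD 1) ≤ 12 := by
  by_cases hw : w ∈ pvAllKws
  · fin_cases hw <;> exact ⟨by decide, by decide, by decide⟩
  · have hget : pvKw.get? w = none := by
      rw [PySem.Dict.get?_eq_none_iff_not_mem_keys, pvKw_keys]
      intro hk
      exact hw (by fin_cases hk <;> decide)
    have hmatch : pvMatchSet w = [] := by
      have : (pvItemsA.flatMap (fun kv => kv.2.filterMap (fun kw => if kw == w then some kv.1 else none))) = [] := by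
        rw [List.flatMap_eq_nil_iff]
        intro kv hkv
        rw [List.filterMap_eq_nil_iff]
        intro kw hkw
        have hin : kw ∈ pvAllKws := by fin_cases hkv <;> simp_all [pvAllKws] <;> tauto
        have : (kw == w) = false := by
          cases hbe : kw == w
          · rfl
          · exact absurd (eq_of_beq hbe ▸ hin) hw
        simp [this]
      unfold pvMatchSet
      rw [this]
      rfl
    rw [hget, hmatch]
    exact ⟨rfl, by decide, by decide⟩
lemma pvNm (m : Int) (h1 : 1 ≤ m) (h2 : m ≤ 12) : pvNameOf m ∈ pvNames ∧ pvNumOf (pvNameOf m) = m := by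
  have key : ∀ n : Nat, n < 12 → pvNameOf ((n : Int) + 1) ∈ pvNames ∧ pvNumOf (pvNameOf ((n : Int) + 1)) = (n : Int) + 1 := by decide
  have h := key (m - 1).toNat (by omega)
  have e : (((m - 1).toNat : Int)) + 1 = m := by omega
  rwa [e] at h

lemma pvInj (y : String) (hy : y ∈ pvNames) : pvNameOf (pvNumOf y) = y := by fin_cases hy <;> rfl

lemma pvMapAdd (bs : List String) (hsub : ∀ x ∈ bs, x ∈ pvNames) (m : Int) (h1 : 1 ≤ m) (h2 : m ≤ 12) :
    (PySem.Set.add bs (pvNameOf m)).map pvNumOf = PySem.Set.add (bs.map pvNumOf) m := by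
  obtain ⟨hmem, hnum⟩ := pvNm m h1 h2
  have hc : pvNameOf m ∈ bs ↔ m ∈ bs.map pvNumOf := by
    constructor
    · intro h; exact hnum ▸ List.mem_map_of_mem h
    · intro h
      obtain ⟨y, hy, hym⟩ := List.mem_map.mp h
      have := pvInj y (hsub y hy)
      rw [← hym, this] at *; exact hy
  by_cases hb : pvNameOf m ∈ bs
  · rw [PySem.Set.add_of_mem hb, PySem.Set.add_of_mem (hc.mp hb)]
  · rw [PySem.Set.add_of_not_mem hb, PySem.Set.add_of_not_mem (fun h => hb (hc.mpr h))]
    simp [hnum]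

lemma pvBuild (ws : List String) : ∀ bs : PySem.Set String, (∀ x ∈ bs, x ∈ pvNames) → bs.Nodup →
    ws.foldl pvMonthsStep (bs.map pvNumOf) = (ws.foldl pvBufferStep bs).map pvNumOf ∧
    (∀ x ∈ ws.foldl pvBufferStep bs, x ∈ pvNames) ∧ (ws.foldl pvBufferStep bs).Nodup := by
  induction ws with
  | nil => intro bs h1 h2; exact ⟨rfl, h1, h2⟩
  | cons w ws ih =>
    intro bs h1 h2
    obtain ⟨hm, hlo, hhi⟩ := pvWord w
    simp only [List.foldl_cons]
    cases hg : pvKw.get? w with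
    | none =>
      have hstep : pvBufferStep bs w = bs := by unfold pvBufferStep; rw [hm, hg]; rfl
      have hstep' : pvMonthsStep (bs.map pvNumOf) w = bs.map pvNumOf := by unfold pvMonthsStep; rw [hg]
      rw [hstep, hstep']; exact ih bs h1 h2
    | some m =>
      rw [hg] at hm hlo hhi
      simp only [Option.getD_some] at hlo hhi
      have hstep : pvBufferStep bs w = PySem.Set.add bs (pvNameOf m) := by
        unfold pvBufferStep; rw [hm]; simp [Option.toList]
      have hstep' : pvMonthsStep (bs.map pvNumOf) w = PySem.Set.add (bs.map pvNumOf) m := by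
        unfold pvMonthsStep; rw [hg]
      rw [hstep, hstep', ← pvMapAdd bs h1 m hlo hhi]
      refine ih _ (fun x hx => ?_) (PySem.Set.nodup_add bs _ h2)
      rcases (PySem.Set.mem_add _ _ _).mp hx with h | h
      · exact h1 x h
      · exact h ▸ (pvNm m hlo hhi).1

lemma pvClassify (bs : PySem.Set String) (hnd : bs.Nodup) (hsub : ∀ x ∈ bs, x ∈ pvNames) :
    pvClassifyA bs = pvClassifyB (bs.map pvNumOf) := by
  set cs := pvNames.filter (fun x => decide (x ∈ bs)) with hcs
  have hcnd : cs.Nodup := List.Nodup.sublist List.filter_sublist (by decide)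
  have hmem : ∀ a, a ∈ bs ↔ a ∈ cs := by
    intro a
    rw [hcs, List.mem_filter]
    constructor
    · intro h; exact ⟨hsub a h, by simpa using h⟩
    · intro h; simpa using h.2
  have hperm : bs.Perm cs := (List.perm_ext_iff_of_nodup hnd hcnd).mpr hmem
  have hA : pvClassifyA bs = pvClassifyA cs := by
    unfold pvClassifyA
    have hfil : pvCouponSets.filter (fun c => PySem.Set.equal bs c) =
        pvCouponSets.filter (fun c => PySem.Set.equal cs c) := by
      apply List.filter_congr
      intro c _
      rw [Bool.eq_iff_iff, PySem.Set.equal_iff, PySem.Set.equal_iff]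
      constructor
      · intro h x; rw [← hmem x]; exact h x
      · intro h x; rw [hmem x]; exact h x
    rw [hfil]
  have hB : pvClassifyB (bs.map pvNumOf) = pvClassifyB (cs.map pvNumOf) := by
    unfold pvClassifyB
    rw [PySem.List.sorted_eq_sorted_of_perm _ _ _ (fun x y h => h) (hperm.map pvNumOf)]
  rw [hA, hB]
  have hsl : cs.Sublist (["january","february","march"] ++ (["april","may","june"] ++
      (["july","august","september"] ++ ["october","november","december"]))) := List.filter_sublist
  obtain ⟨a, rest, heq, ha, hrest⟩ := List.sublist_append_iff.mp hsl
  obtain ⟨b, rest2, heq2, hb, hrest2⟩ := List.sublist_append_iff.mp hrest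
  obtain ⟨c, d, heq3, hc, hd⟩ := List.sublist_append_iff.mp hrest2
  rw [show cs = a ++ (b ++ (c ++ d)) by rw [heq, heq2, heq3]]
  exact pvTable a (List.mem_sublists.mpr ha) b (List.mem_sublists.mpr hb)
    c (List.mem_sublists.mpr hc) d (List.mem_sublists.mpr hd)


-- ===== VERDICT (by name: the statement is the Claim_ definition above) =====
theorem coupon_frequency_cleaning_spec : Claim_equal_coupon_frequency_cleaning := by
  intro s _
  unfold Spec_coupon_frequency_cleaning coupon_frequency_cleaning coupon_frequency_cleaning_alt
  obtain ⟨h1, h2, h3⟩ := pvBuild (PySem.Str.split₀ (PySem.Str.lower s)) [] (by simp) (by simp)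
  have hinit : (PySem.Set.empty : PySem.Set Int) = (([] : PySem.Set String)).map pvNumOf := rfl
  rw [hinit, h1]
  exact pvClassify _ h3 h2
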